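-- pv_equiv track=rewrite | github.com/medusa606/directory_website | upload_to_supabase.py | build_insert_payload
-- ===== SOURCE A (Python) =====
-- def clean_value(v) -> str | None:
--     """Normalise a CSV cell: blank / 'nan' / 'None' → None."""
--     if v is None:
--         return None
--     s = str(v).strip()
--     if s.lower() in ("", "nan", "none", "null"):
--         return None
--     return s
--
-- def build_insert_payload(row: dict, db_columns: list[str]) -> dict:
--     """Return a dict of non-null CSV values that exist in the DB schema."""
--     payload: dict = {}
--     for col in db_columns:
--         if col == "id":
--             continue
--         v = clean_value(row.get(col))
--         if v is not None:
--             payload[col] = v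
--     return payload
-- ===== SOURCE B (Python) =====
-- def clean_value(v):
--     """Normalise a CSV cell: blank / 'nan' / 'None' -> None."""
--     if v is None:
--         return None
--     s = str(v).strip()
--     if s.lower() in ("", "nan", "none", "null"):
--         return None
--     return s
--
-- def build_insert_payload(row, db_columns):
--     """Clean the whole row once, then select the schema columns from it."""
--     cleaned = {}
--     for col, raw in row.items():
--         v = clean_value(raw)
--         if v is not None:
--             cleaned[col] = v
--     return {col: cleaned[col] for col in db_columns if col != "id" and col in cleaned}
-- ===== Notes on version B (the rewrite author's own statement) =====
-- stated objective: idiomatic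
-- what changed: Instead of probing and cleaning the row once per schema column, B makes one pass over row.items() building a cleaned dict, then selects the schema columns from it with a dict comprehension; Pre_ excludes only assoc-lists encoding the row with duplicate keys (impossible for a real Python dict), where first-match vs last-match order is an artefact of the encoding.
import Mathlib
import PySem

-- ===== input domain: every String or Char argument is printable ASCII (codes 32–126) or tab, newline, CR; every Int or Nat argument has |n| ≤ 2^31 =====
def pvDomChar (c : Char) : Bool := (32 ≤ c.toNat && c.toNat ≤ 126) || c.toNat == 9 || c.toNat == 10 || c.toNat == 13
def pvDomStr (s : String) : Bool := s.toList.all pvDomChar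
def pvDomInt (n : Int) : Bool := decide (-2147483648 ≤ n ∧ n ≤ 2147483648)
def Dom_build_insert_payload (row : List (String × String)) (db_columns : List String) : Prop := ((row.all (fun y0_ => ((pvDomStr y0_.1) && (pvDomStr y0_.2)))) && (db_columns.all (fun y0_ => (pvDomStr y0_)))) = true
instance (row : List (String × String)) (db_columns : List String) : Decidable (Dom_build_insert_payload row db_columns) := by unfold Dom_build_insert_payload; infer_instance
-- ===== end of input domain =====

-- B cleans the whole row in one pass, then selects schema columns from the cleaned dict
-- (A probes and cleans the row once per schema column); return values proved equal on Pre_.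

-- ===== PORT A =====
-- clean_value applied to row.get(col) (None for a missing key)
def cleanValue (v : Option String) : Option String :=
  match v with
  | none => none
  | some x =>
    let s := PySem.Str.strip x
    if PySem.Str.lower s = "" ∨ PySem.Str.lower s = "nan" ∨
       PySem.Str.lower s = "none" ∨ PySem.Str.lower s = "null" then none
    else some s

def build_insert_payload (row : List (String × String)) (db_columns : List String) : List (String × String) :=
  (db_columns.foldl
    (fun (payload : PySem.Dict String String) col =>
      if col = "id" then payload
      else
        match cleanValue ((PySem.Dict.mk row).get? col) with
        | none => payload
        | some v => payload.insert col v)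
    PySem.Dict.empty).items

-- ===== PORT B =====
-- pass 1: cleaned = {col: clean_value(raw) for non-null cleaned cells of the row}
def pvCleanedRow (row : List (String × String)) : PySem.Dict String String :=
  row.foldl
    (fun (d : PySem.Dict String String) p =>
      match cleanValue (some p.2) with
      | none => d
      | some v => d.insert p.1 v)
    PySem.Dict.empty

def build_insert_payload_alt (row : List (String × String)) (db_columns : List String) : List (String × String) :=
  let cleaned := pvCleanedRow row
  -- pass 2: {col: cleaned[col] for col in db_columns if col != "id" and col in cleaned}
  (db_columns.foldl
    (fun (payload : PySem.Dict String String) col =>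
      if col = "id" then payload
      else
        match cleaned.get? col with
        | none => payload
        | some v => payload.insert col v)
    PySem.Dict.empty).items

-- ===== PRECONDITION & SPEC =====
-- Pre_ excludes only assoc-lists encoding the row with duplicate keys: a real Python dict
-- cannot have them, and there A's first-match lookup vs B's overwrite-on-build are both
-- accidents of the encoding. It excludes no input representable as a Python dict.
def Pre_build_insert_payload (row : List (String × String)) (db_columns : List String) : Prop :=
  (row.map Prod.fst).Nodup

instance (row : List (String × String)) (db_columns : List String) : Decidable (Pre_build_insert_payload row db_columns) := by unfold Pre_build_insert_payload; infer_instance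

def pvWitness_build_insert_payload : (List (String × String)) × List String :=
  ([("name", " Bob "), ("age", "nan")], ["id", "name", "age"])

def Spec_build_insert_payload (row : List (String × String)) (db_columns : List String) (out : List (String × String)) : Prop := out = build_insert_payload_alt row db_columns
instance (row : List (String × String)) (db_columns : List String) (out : List (String × String)) : Decidable (Spec_build_insert_payload row db_columns out) := by unfold Spec_build_insert_payload; infer_instance

-- ===== CLAIM (what is proved, stated in full; the proofs are below) =====
def Claim_equal_build_insert_payload : Prop := ∀ (row : List (String × String)) (db_columns : List String), Dom_build_insert_payload row db_columns → Pre_build_insert_payload row db_columns → Spec_build_insert_payload row db_columns (build_insert_payload row db_columns)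

-- ===== LEMMAS AND PROOFS =====

-- the cleaned dict looks up as clean_value of the row's (first-match) lookup
theorem pvCleanedRow_aux (row : List (String × String)) :
    ∀ (d : PySem.Dict String String) (col : String),
      (row.map Prod.fst).Nodup →
      (∀ k, k ∈ row.map Prod.fst → d.get? k = none) →
      (row.foldl
        (fun (d : PySem.Dict String String) p =>
          match cleanValue (some p.2) with
          | none => d
          | some v => d.insert p.1 v) d).get? col =
      (match cleanValue ((PySem.Dict.mk row).get? col) with
       | none => d.get? col
       | some v => some v) := by
  induction row with
  | nil =>
    intro d col _ _
    rfl
  | cons p rest ih =>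
    intro d col hnd hnone
    obtain ⟨k, w⟩ := p
    simp only [List.map_cons, List.nodup_cons] at hnd
    have hk : k ∉ rest.map Prod.fst := hnd.1
    have hrest := hnd.2
    simp only [List.foldl_cons]
    have hstep : ∀ j, j ∈ rest.map Prod.fst →
        (match cleanValue (some w) with
         | none => d
         | some v => d.insert k v).get? j = none := by
      intro j hj
      have hjk : j ≠ k := by intro h; exact hk (h ▸ hj)
      cases hc : cleanValue (some w) with
      | none => exact hnone j (by simp [hj])
      | some v =>
        rw [PySem.Dict.get?_insert_of_ne _ _ hjk]
        exact hnone j (by simp [hj])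
    rw [ih _ col hrest hstep]
    rw [PySem.Dict.get?_mk_cons]
    by_cases hck : k = col
    · subst hck
      have hb : (k == k) = true := by simp
      rw [hb]
      simp only [if_true]
      have hnorest : (PySem.Dict.mk rest).get? k = none := by
        rw [PySem.Dict.get?_eq_none_iff_not_mem_keys]
        simpa using hk
      rw [hnorest]
      cases hc : cleanValue (some w) with
      | none => simp [cleanValue]
      | some v => simp [cleanValue]
    · have hb : (k == col) = false := by simp [hck]
      rw [hb]
      simp only [Bool.false_eq_true, if_false]
      cases hc : cleanValue (some w) with
      | none => rfl
      | some v =>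
        rw [PySem.Dict.get?_insert_of_ne _ _ (fun h => hck h.symm)]

theorem pvCleanedRow_get (row : List (String × String)) (col : String)
    (hnd : (row.map Prod.fst).Nodup) :
    (pvCleanedRow row).get? col = cleanValue ((PySem.Dict.mk row).get? col) := by
  unfold pvCleanedRow
  rw [pvCleanedRow_aux row PySem.Dict.empty col hnd (fun k _ => PySem.Dict.get?_empty k)]
  cases h : cleanValue ((PySem.Dict.mk row).get? col) with
  | none => exact PySem.Dict.get?_empty col
  | some v => rfl

-- ===== VERDICT (by name: the statement is the Claim_ definition above) =====
theorem build_insert_payload_spec : Claim_equal_build_insert_payload := by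
  intro row db_columns _ hpre
  unfold Spec_build_insert_payload build_insert_payload build_insert_payload_alt
  have hfold : ∀ (cols : List String) (payload : PySem.Dict String String),
      cols.foldl
        (fun (payload : PySem.Dict String String) col =>
          if col = "id" then payload
          else
            match cleanValue ((PySem.Dict.mk row).get? col) with
            | none => payload
            | some v => payload.insert col v) payload =
      cols.foldl
        (fun (payload : PySem.Dict String String) col =>
          if col = "id" then payload
          else
            match (pvCleanedRow row).get? col with
            | none => payload
            | some v => payload.insert col v) payload := by
    intro cols
    induction cols with
    | nil => intro payload; rfl
    | cons c cs ih =>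
      intro payload
      simp only [List.foldl_cons]
      rw [pvCleanedRow_get row c hpre, ih]
  rw [hfold]
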